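-- pv_equiv track=rewrite | github.com/CandyDong/Music-Page-Flip | Candy_Dong/midiTracker/readLiveMidi.py | getNoteGroups
-- ===== SOURCE A (Python) =====
-- NOTE_NUM = 2
--
-- DELTA_TICK = 5
--
-- def getNoteGroups(notes):
-- 	noteGroups = []
--
-- 	i = 0
-- 	while (i < len(notes)):
-- 		tmp = [notes[i][NOTE_NUM]]
-- 		j = i+1
-- 		while (j < len(notes)) and (notes[j][DELTA_TICK] == 0):
-- 			tmp.append(notes[j][NOTE_NUM])
-- 			j += 1
-- 		noteGroups.append(tmp)
-- 		i = j
--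
-- 	return noteGroups
-- ===== SOURCE B (Python) =====
-- NOTE_NUM = 2
--
-- DELTA_TICK = 5
--
-- def getNoteGroups(notes):
-- 	groups = []
-- 	for idx, note in enumerate(notes):
-- 		if idx == 0 or note[DELTA_TICK] != 0:
-- 			groups.append([note[NOTE_NUM]])
-- 		else:
-- 			groups[-1].append(note[NOTE_NUM])
-- 	return groups
-- ===== Notes on version B (the rewrite author's own statement) =====
-- stated objective: simpler
-- what changed: Replaced the nested while loops with index jumping by a single flat enumerate loop that either starts a new group or appends to the last one.
import Mathlib
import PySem

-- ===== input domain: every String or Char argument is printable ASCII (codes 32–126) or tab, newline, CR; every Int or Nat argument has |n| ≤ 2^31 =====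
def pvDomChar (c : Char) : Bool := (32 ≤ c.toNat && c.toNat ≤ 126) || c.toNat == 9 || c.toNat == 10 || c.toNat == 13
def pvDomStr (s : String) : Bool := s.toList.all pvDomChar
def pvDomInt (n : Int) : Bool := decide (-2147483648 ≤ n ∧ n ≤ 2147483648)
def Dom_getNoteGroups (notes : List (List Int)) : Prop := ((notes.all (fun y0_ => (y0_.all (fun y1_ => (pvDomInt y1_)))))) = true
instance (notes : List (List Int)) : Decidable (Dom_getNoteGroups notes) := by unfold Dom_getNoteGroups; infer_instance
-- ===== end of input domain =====

-- B replaces A's nested while loops (index jumping) by one flat loop over enumerate; return values only, no observable mutation.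

-- ===== PORT A =====
-- inner while: (j < len(notes)) and (notes[j][DELTA_TICK] == 0): tmp.append(notes[j][NOTE_NUM]); j += 1
def innerA (notes : List (List Int)) (j : Nat) (tmp : List Int) : List Int × Nat :=
  if _h : j < notes.length then
    if PySem.List.pyGetD (PySem.List.pyGetD notes (j : Int) []) 5 0 = 0 then
      innerA notes (j + 1) (tmp ++ [PySem.List.pyGetD (PySem.List.pyGetD notes (j : Int) []) 2 0])
    else (tmp, j)
  else (tmp, j)
termination_by notes.length - j

-- the port's termination needs this fact about the inner loop, so it stays above outerA
theorem innerA_le (notes : List (List Int)) (j : Nat) (tmp : List Int) :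
    j ≤ (innerA notes j tmp).2 := by
  fun_induction innerA notes j tmp with
  | case1 j tmp h hz ih => omega
  | case2 j tmp h hz => simp
  | case3 j tmp h => simp

-- outer while: tmp = [notes[i][NOTE_NUM]]; j = inner loop; noteGroups.append(tmp); i = j
def outerA (notes : List (List Int)) (i : Nat) (acc : List (List Int)) : List (List Int) :=
  if _h : i < notes.length then
    let r := innerA notes (i + 1) [PySem.List.pyGetD (PySem.List.pyGetD notes (i : Int) []) 2 0]
    outerA notes r.2 (acc ++ [r.1])
  else acc
termination_by notes.length - i
decreasing_by
  have := innerA_le notes (i + 1) [PySem.List.pyGetD (PySem.List.pyGetD notes (i : Int) []) 2 0]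
  omega

def getNoteGroups (notes : List (List Int)) : List (List Int) := outerA notes 0 []

-- ===== PORT B =====
-- flat for-loop over enumerate(notes): start a new group, or append to the last one
def altGo (notes : List (List Int)) (idx : Nat) (groups : List (List Int)) : List (List Int) :=
  match notes with
  | [] => groups
  | note :: rest =>
    if idx = 0 ∨ ¬ PySem.List.pyGetD note 5 0 = 0 then
      altGo rest (idx + 1) (groups ++ [[PySem.List.pyGetD note 2 0]])
    else
      altGo rest (idx + 1) (groups.dropLast ++ [groups.getLastD [] ++ [PySem.List.pyGetD note 2 0]])

def getNoteGroups_alt (notes : List (List Int)) : List (List Int) := altGo notes 0 []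

-- ===== PRECONDITION & SPEC =====
-- Pre_ excludes exactly the inputs where the Python A (and B) raises IndexError: a first row
-- without index NOTE_NUM = 2, or a later row without index DELTA_TICK = 5.
def Pre_getNoteGroups (notes : List (List Int)) : Prop :=
  (∀ x ∈ notes.tail, 5 < x.length) ∧ (notes = [] ∨ 2 < notes.headI.length)
instance (notes : List (List Int)) : Decidable (Pre_getNoteGroups notes) := by
  unfold Pre_getNoteGroups; infer_instance

def pvWitness_getNoteGroups : List (List Int) :=
  [[0, 0, 60], [0, 0, 62, 0, 0, 0], [0, 0, 64, 0, 0, 1]]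

def Spec_getNoteGroups (notes : List (List Int)) (out : List (List Int)) : Prop := out = getNoteGroups_alt notes
instance (notes : List (List Int)) (out : List (List Int)) : Decidable (Spec_getNoteGroups notes out) := by unfold Spec_getNoteGroups; infer_instance

-- ===== CLAIM (what is proved, stated in full; the proofs are below) =====
def Claim_equal_getNoteGroups : Prop := ∀ (notes : List (List Int)), Dom_getNoteGroups notes → Pre_getNoteGroups notes → Spec_getNoteGroups notes (getNoteGroups notes)

-- ===== LEMMAS AND PROOFS =====

theorem key (notes : List (List Int)) :
    ∀ (rest : List (List Int)) (i : Nat) (tmp : List Int) (acc : List (List Int)),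
      1 ≤ i → notes.drop i = rest →
      outerA notes (innerA notes i tmp).2 (acc ++ [(innerA notes i tmp).1]) =
        altGo rest i (acc ++ [tmp]) := by
  intro rest
  induction rest with
  | nil =>
    intro i tmp acc _hi hdrop
    have hlen : notes.length ≤ i := by
      simpa using List.drop_eq_nil_iff.mp hdrop
    rw [innerA]
    simp only [dif_neg (by omega : ¬ i < notes.length)]
    rw [outerA]
    simp [dif_neg (by omega : ¬ i < notes.length), altGo]
  | cons n rest' ih =>
    intro i tmp acc hi hdrop
    have hlt : i < notes.length := by
      by_contra h
      rw [List.drop_eq_nil_of_le (by omega)] at hdrop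
      simp at hdrop
    have hget : notes[i]? = some n := by
      have h0 := congrArg (fun l => l[0]?) hdrop
      simpa [List.getElem?_drop] using h0
    have hgetD : PySem.List.pyGetD notes (i : Int) [] = n := by
      simp [PySem.List.pyGetD_natCast, List.getD, hget]
    have hdrop' : notes.drop (i + 1) = rest' := by
      have h1 := congrArg List.tail hdrop
      simpa [List.tail_drop] using h1
    by_cases hz : PySem.List.pyGetD n 5 0 = 0
    · -- delta tick 0: joins the current group
      rw [innerA]
      simp only [dif_pos hlt, hgetD, if_pos hz]
      rw [ih (i + 1) (tmp ++ [PySem.List.pyGetD n 2 0]) acc (by omega) hdrop']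
      rw [altGo]
      rw [if_neg (by
        intro hc
        cases hc with
        | inl h0 => omega
        | inr hP => exact hP hz)]
      rw [List.dropLast_concat, List.getLastD_concat]
    · -- delta tick ≠ 0: a new group starts here
      have e1 : innerA notes i tmp = (tmp, i) := by
        rw [innerA]
        simp only [dif_pos hlt, hgetD]
        rw [if_neg hz]
      rw [e1]
      rw [outerA]
      simp only [dif_pos hlt, hgetD]
      rw [ih (i + 1) [PySem.List.pyGetD n 2 0] (acc ++ [tmp]) (by omega) hdrop']
      rw [altGo, if_pos (Or.inr hz)]

-- ===== VERDICT (by name: the statement is the Claim_ definition above) =====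
theorem getNoteGroups_spec : Claim_equal_getNoteGroups := by
  intro notes _dom _pre
  unfold Spec_getNoteGroups getNoteGroups getNoteGroups_alt
  match notes with
  | [] => rw [outerA]; simp [altGo]
  | n :: rest =>
    rw [outerA]
    simp only [dif_pos (by simp : 0 < (n :: rest).length), Nat.cast_zero,
      PySem.List.pyGetD_zero_cons, List.nil_append]
    rw [altGo, if_pos (Or.inl rfl)]
    have h := key (n :: rest) rest (0 + 1) [PySem.List.pyGetD n 2 0] [] (by omega) (by simp)
    simpa using h
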